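-- pv_equiv track=rewrite | github.com/myname1111/Maze-Game | maze.py | init_maze
-- ===== SOURCE A (Python) =====
-- from typing import Optional, Tuple
--
-- def init_maze(size: Tuple[int, int]) -> list[list[str]]:
--     """
--     Initialise a maze represented with characters
--
--     Args:
--         size (int, int): The size of the maze
--
--     Returns:
--         [[str]]: An empty maze
--     """
--     maze = []
--     for x in range(size[0] * 2 + 1):
--         row = []
--         for y in range(size[1] * 2 + 1):
--             row.append(" " if x % 2 == 1 and y % 2 == 1 else "#")
--         maze.append(row)
--     return maze
-- ===== SOURCE B (Python) =====
-- from typing import Optional, Tuple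
--
-- def init_maze(size: Tuple[int, int]) -> list[list[str]]:
--     # Carving approach: start from a grid made entirely of walls, then
--     # knock out the cell at (2*i+1, 2*j+1) for every room (i, j).
--     height = size[0] * 2 + 1
--     width = size[1] * 2 + 1
--     maze = [["#"] * width for _ in range(height)]
--     for i in range(size[0]):
--         row = maze[2 * i + 1]
--         for j in range(size[1]):
--             row[2 * j + 1] = " "
--     return maze
-- ===== Notes on version B (the rewrite author's own statement) =====
-- stated objective: alternative
-- what changed: B builds an all-wall grid first and then carves out one cell per room by indexed assignment (iterating over rooms, not grid cells), instead of A's per-cell joint-parity test over the whole grid.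
import Mathlib
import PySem

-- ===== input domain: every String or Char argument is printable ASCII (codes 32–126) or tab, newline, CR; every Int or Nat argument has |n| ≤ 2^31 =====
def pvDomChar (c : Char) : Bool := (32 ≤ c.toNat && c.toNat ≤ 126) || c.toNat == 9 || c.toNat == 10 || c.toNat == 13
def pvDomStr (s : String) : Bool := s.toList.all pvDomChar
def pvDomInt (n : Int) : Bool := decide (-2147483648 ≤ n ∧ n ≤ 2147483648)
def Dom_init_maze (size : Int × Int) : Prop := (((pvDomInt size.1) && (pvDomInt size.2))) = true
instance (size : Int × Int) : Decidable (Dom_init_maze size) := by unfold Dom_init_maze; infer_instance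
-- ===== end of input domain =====

-- B: build an all-wall grid, then carve one cell per room by indexed assignment, instead of A's per-cell joint-parity test (alternative algorithm, same cost).

-- ===== PORT A =====
-- (x % 2, y % 2: Lean Int emod agrees with Python % for the positive divisor 2)
def init_maze (size : Int × Int) : List (List String) :=
  (PySem.List.pyRange 0 (size.1 * 2 + 1) 1).foldl (fun maze x =>
    maze ++ [ (PySem.List.pyRange 0 (size.2 * 2 + 1) 1).foldl (fun row y =>
      row ++ [if x % 2 == 1 && y % 2 == 1 then " " else "#"]) [] ]) []

-- ===== PORT B =====
-- ["#"] * width for negative width is [] in Python, matching List.replicate width.toNat;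
-- maze[2*i+1] / row[2*j+1] assignments use indices that are in range for every i,j the
-- loops produce (2*i+1 ≤ 2*size.1-1 < height, likewise for j), and (2*i+1).toNat is exact
-- since i ≥ 0; the aliased in-place row mutation is ported as List.modify of that row.
def init_maze_alt (size : Int × Int) : List (List String) :=
  let height := size.1 * 2 + 1
  let width := size.2 * 2 + 1
  let maze := (PySem.List.pyRange 0 height 1).map (fun _ => List.replicate width.toNat "#")
  (PySem.List.pyRange 0 size.1 1).foldl (fun m i =>
    m.modify (2 * i + 1).toNat (fun row =>
      (PySem.List.pyRange 0 size.2 1).foldl (fun r j => r.set (2 * j + 1).toNat " ") row)) maze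

-- ===== PRECONDITION & SPEC =====
def Spec_init_maze (size : Int × Int) (out : List (List String)) : Prop := out = init_maze_alt size
instance (size : Int × Int) (out : List (List String)) : Decidable (Spec_init_maze size out) := by unfold Spec_init_maze; infer_instance

-- ===== CLAIM (what is proved, stated in full; the proofs are below) =====
def Claim_equal_init_maze : Prop := ∀ (size : Int × Int), Dom_init_maze size → Spec_init_maze size (init_maze size)

-- ===== LEMMAS AND PROOFS =====

-- carving a single wall row: sets at positions 2j+1, j < m, on an all-# row
theorem carve_row_eq (w m : Nat) :
    (List.range m).foldl (fun r j => r.set (2 * j + 1) " ") (List.replicate w "#")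
    = (List.range w).map (fun y => if y % 2 == 1 && y < 2 * m then " " else ("#" : String)) := by
  induction m with
  | zero =>
      apply List.ext_getElem
      · simp
      · intro i h1 h2; simp
  | succ m ih =>
      rw [List.range_succ, List.foldl_append, ih]
      apply List.ext_getElem
      · simp
      · intro i h1 h2
        simp only [List.foldl_cons, List.foldl_nil, List.getElem_set, List.getElem_map,
          List.getElem_range]
        by_cases hi : 2 * m + 1 = i
        · simp only [hi]
          have : i % 2 == 1 && i < 2 * (m + 1) := by
            simp only [Bool.and_eq_true, beq_iff_eq, decide_eq_true_eq]; omega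
          simp [← hi]
          omega
        · rw [if_neg hi]
          congr 1
          simp only [Bool.and_eq_true, beq_iff_eq, decide_eq_true_eq, eq_iff_iff]
          constructor <;> (intro ⟨h2, h3⟩; exact ⟨h2, by omega⟩)

-- carving rows 2i+1, i < n, of an all-wall grid
theorem carve_grid_eq (H n : Nat) (wall : List String) (carve : List String → List String) :
    (List.range n).foldl (fun m i => m.modify (2 * i + 1) carve) (List.replicate H wall)
    = (List.range H).map (fun x => if x % 2 == 1 && x < 2 * n then carve wall else wall) := by
  induction n with
  | zero =>
      apply List.ext_getElem
      · simp
      · intro i h1 h2; simp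
  | succ n ih =>
      rw [List.range_succ, List.foldl_append, ih]
      apply List.ext_getElem
      · simp
      · intro i h1 h2
        simp only [List.foldl_cons, List.foldl_nil, List.getElem_modify, List.getElem_map,
          List.getElem_range]
        by_cases hi : 2 * n + 1 = i
        · have : i % 2 == 1 && i < 2 * (n + 1) := by
            simp only [Bool.and_eq_true, beq_iff_eq, decide_eq_true_eq]; omega
          have hn : ¬(i % 2 == 1 && i < 2 * n) = true := by
            simp only [Bool.and_eq_true, beq_iff_eq, decide_eq_true_eq]; omega
          simp [hi, this, hn]
        · rw [if_neg hi]
          congr 1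
          simp only [Bool.and_eq_true, beq_iff_eq, decide_eq_true_eq, eq_iff_iff]
          constructor <;> (intro ⟨h2, h3⟩; exact ⟨h2, by omega⟩)

-- ===== VERDICT (by name: the statement is the Claim_ definition above) =====
theorem init_maze_spec : Claim_equal_init_maze := by
  intro size _
  obtain ⟨a, b⟩ := size
  unfold Spec_init_maze init_maze init_maze_alt
  simp only []
  rw [PySem.List.foldl_append_singleton_eq_map, List.nil_append]
  rw [PySem.List.pyRange_one 0 (a * 2 + 1)]
  conv_rhs => rw [PySem.List.pyRange_one 0 a, PySem.List.pyRange_one 0 b]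
  simp only [Int.sub_zero, List.map_map, List.foldl_map, Function.comp_def]
  have hmaze : (List.range (a * 2 + 1).toNat).map
      (fun _ => List.replicate (b * 2 + 1).toNat ("#" : String))
      = List.replicate (a * 2 + 1).toNat (List.replicate (b * 2 + 1).toNat "#") := by
    simp [List.map_const']
  rw [hmaze]
  have hidx : ∀ i : Nat, (2 * ((0 : Int) + (i : Int)) + 1).toNat = 2 * i + 1 := by
    intro i; omega
  simp only [hidx]
  rw [carve_grid_eq]
  simp only [carve_row_eq]
  apply List.ext_getElem
  · simp
  · intro x hx1 hx2
    simp only [List.getElem_map, List.getElem_range]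
    rw [PySem.List.foldl_append_singleton_eq_map, List.nil_append,
      PySem.List.pyRange_one 0 (b * 2 + 1)]
    simp only [Int.sub_zero, List.map_map, Function.comp_def]
    by_cases hxodd : ((0 : Int) + (x : Int)) % 2 = 1
    · have hx2' : (x % 2 == 1 && x < 2 * a.toNat) = true := by
        simp only [Bool.and_eq_true, beq_iff_eq, decide_eq_true_eq]
        have hxa : x < (a * 2 + 1).toNat := by simpa using hx2
        omega
      rw [if_pos hx2']
      apply List.ext_getElem
      · simp
      · intro y hy1 hy2
        simp only [List.getElem_map, List.getElem_range]
        have hyb : y < (b * 2 + 1).toNat := by simpa using hy1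
        have hxx : (((0 : Int) + (x : Int)) % 2 == 1) = true := by simpa using hxodd
        rw [hxx, Bool.true_and]
        congr 1
        simp only [Bool.and_eq_true, beq_iff_eq, decide_eq_true_eq, eq_iff_iff]
        omega
    · have hx2' : ¬(x % 2 == 1 && x < 2 * a.toNat) = true := by
        simp only [Bool.and_eq_true, beq_iff_eq, decide_eq_true_eq]
        omega
      rw [if_neg hx2']
      apply List.ext_getElem
      · simp
      · intro y hy1 hy2
        simp only [List.getElem_map, List.getElem_range, List.getElem_replicate]
        have : (((0 : Int) + (x : Int)) % 2 == 1 && ((0 : Int) + (y : Int)) % 2 == 1) = false := by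
          simp only [Bool.and_eq_false_iff, beq_eq_false_iff_ne, ne_eq]
          left; exact hxodd
        rw [this]
        simp
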